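-- pv_equiv track=rewrite | github.com/jpegdigital/grove-sync | src/commands/calibrate.py | _passing_counts
-- ===== SOURCE A (Python) =====
-- def _passing_counts(videos: list[dict]) -> dict:
--     return {
--         "min_60s": sum(1 for v in videos if v.get("duration_seconds", 0) >= 60),
--         "min_300s": sum(1 for v in videos if v.get("duration_seconds", 0) >= 300),
--         "min_300s_max_1800s": sum(1 for v in videos if 300 <= v.get("duration_seconds", 0) <= 1800),
--         "min_300s_max_3600s": sum(1 for v in videos if 300 <= v.get("duration_seconds", 0) <= 3600),
--         "min_60s_max_1800s": sum(1 for v in videos if 60 <= v.get("duration_seconds", 0) <= 1800),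
--         "min_60s_max_3600s": sum(1 for v in videos if 60 <= v.get("duration_seconds", 0) <= 3600),
--     }
-- ===== SOURCE B (Python) =====
-- def _passing_counts(videos: list[dict]) -> dict:
--     # Single pass over videos with six counters instead of six full scans (different decomposition, same cost).
--     c60 = c300 = r300_1800 = r300_3600 = r60_1800 = r60_3600 = 0
--     for v in videos:
--         d = v.get("duration_seconds", 0)
--         if d >= 60:
--             c60 += 1
--             if d <= 1800:
--                 r60_1800 += 1
--             if d <= 3600:
--                 r60_3600 += 1
--             if d >= 300:
--                 c300 += 1
--                 if d <= 1800:
--                     r300_1800 += 1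
--                 if d <= 3600:
--                     r300_3600 += 1
--     return {
--         "min_60s": c60,
--         "min_300s": c300,
--         "min_300s_max_1800s": r300_1800,
--         "min_300s_max_3600s": r300_3600,
--         "min_60s_max_1800s": r60_1800,
--         "min_60s_max_3600s": r60_3600,
--     }
-- ===== Notes on version B (the rewrite author's own statement) =====
-- stated objective: alternative
-- what changed: Replaces six separate generator-sum scans of the video list with a single pass maintaining six counters (nested threshold tests classify each video once); same asymptotic cost, measured same speed.
import Mathlib
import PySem

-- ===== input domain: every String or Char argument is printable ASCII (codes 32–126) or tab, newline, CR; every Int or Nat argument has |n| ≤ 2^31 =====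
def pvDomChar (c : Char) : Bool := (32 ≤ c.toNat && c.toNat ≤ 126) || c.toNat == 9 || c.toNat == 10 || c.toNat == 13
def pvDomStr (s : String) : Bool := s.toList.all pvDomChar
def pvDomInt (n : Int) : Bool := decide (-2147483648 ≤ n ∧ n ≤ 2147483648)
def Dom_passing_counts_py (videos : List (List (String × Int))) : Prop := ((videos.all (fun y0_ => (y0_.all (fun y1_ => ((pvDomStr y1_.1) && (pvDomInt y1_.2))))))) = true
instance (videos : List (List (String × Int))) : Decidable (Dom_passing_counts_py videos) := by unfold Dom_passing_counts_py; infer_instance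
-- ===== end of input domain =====

-- B replaces A's six separate scans of the list by one pass with six counters; same return value.

-- v.get("duration_seconds", 0): first-match lookup in the association list, default 0
def pvGetDur (v : List (String × Int)) : Int :=
  ((v.find? (fun p => p.1 == "duration_seconds")).map Prod.snd).getD 0

-- ===== PORT A =====
def passing_counts_py (videos : List (List (String × Int))) : List (String × Int) :=
  [("min_60s", videos.foldl (fun acc v => if 60 ≤ pvGetDur v then acc + 1 else acc) 0),
   ("min_300s", videos.foldl (fun acc v => if 300 ≤ pvGetDur v then acc + 1 else acc) 0),
   ("min_300s_max_1800s", videos.foldl (fun acc v => if 300 ≤ pvGetDur v ∧ pvGetDur v ≤ 1800 then acc + 1 else acc) 0),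
   ("min_300s_max_3600s", videos.foldl (fun acc v => if 300 ≤ pvGetDur v ∧ pvGetDur v ≤ 3600 then acc + 1 else acc) 0),
   ("min_60s_max_1800s", videos.foldl (fun acc v => if 60 ≤ pvGetDur v ∧ pvGetDur v ≤ 1800 then acc + 1 else acc) 0),
   ("min_60s_max_3600s", videos.foldl (fun acc v => if 60 ≤ pvGetDur v ∧ pvGetDur v ≤ 3600 then acc + 1 else acc) 0)]

-- ===== PORT B =====
def pvStep (s : Int × Int × Int × Int × Int × Int) (v : List (String × Int)) :
    Int × Int × Int × Int × Int × Int :=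
  let d := pvGetDur v
  match s with
  | (c60, c300, r31, r33, r61, r63) =>
    if 60 ≤ d then
      let c60' := c60 + 1
      let r61' := if d ≤ 1800 then r61 + 1 else r61
      let r63' := if d ≤ 3600 then r63 + 1 else r63
      if 300 ≤ d then
        (c60', c300 + 1, (if d ≤ 1800 then r31 + 1 else r31),
         (if d ≤ 3600 then r33 + 1 else r33), r61', r63')
      else
        (c60', c300, r31, r33, r61', r63')
    else
      (c60, c300, r31, r33, r61, r63)

def passing_counts_py_alt (videos : List (List (String × Int))) : List (String × Int) :=
  match videos.foldl pvStep (0, 0, 0, 0, 0, 0) with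
  | (c60, c300, r31, r33, r61, r63) =>
    [("min_60s", c60), ("min_300s", c300),
     ("min_300s_max_1800s", r31), ("min_300s_max_3600s", r33),
     ("min_60s_max_1800s", r61), ("min_60s_max_3600s", r63)]

-- ===== PRECONDITION & SPEC =====
def Spec_passing_counts_py (videos : List (List (String × Int))) (out : List (String × Int)) : Prop := out = passing_counts_py_alt videos
instance (videos : List (List (String × Int))) (out : List (String × Int)) : Decidable (Spec_passing_counts_py videos out) := by unfold Spec_passing_counts_py; infer_instance

-- ===== CLAIM (what is proved, stated in full; the proofs are below) =====
def Claim_equal_passing_counts_py : Prop := ∀ (videos : List (List (String × Int))), Dom_passing_counts_py videos → Spec_passing_counts_py videos (passing_counts_py videos)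

-- ===== LEMMAS AND PROOFS =====

lemma pvStep_foldl (l : List (List (String × Int)))
    (c60 c300 r31 r33 r61 r63 : Int) :
    l.foldl pvStep (c60, c300, r31, r33, r61, r63) =
      (c60 + (l.countP (fun v => decide (60 ≤ pvGetDur v)) : Int),
       c300 + (l.countP (fun v => decide (300 ≤ pvGetDur v)) : Int),
       r31 + (l.countP (fun v => decide (300 ≤ pvGetDur v ∧ pvGetDur v ≤ 1800)) : Int),
       r33 + (l.countP (fun v => decide (300 ≤ pvGetDur v ∧ pvGetDur v ≤ 3600)) : Int),
       r61 + (l.countP (fun v => decide (60 ≤ pvGetDur v ∧ pvGetDur v ≤ 1800)) : Int),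
       r63 + (l.countP (fun v => decide (60 ≤ pvGetDur v ∧ pvGetDur v ≤ 3600)) : Int)) := by
  induction l generalizing c60 c300 r31 r33 r61 r63 with
  | nil => simp
  | cons v l ih =>
    simp only [List.foldl_cons, List.countP_cons, pvStep]
    by_cases h60 : 60 ≤ pvGetDur v <;>
      by_cases h300 : 300 ≤ pvGetDur v <;>
        by_cases h18 : pvGetDur v ≤ 1800 <;>
          by_cases h36 : pvGetDur v ≤ 3600 <;>
            simp [ih, h60, h300, h18, h36] <;> omega

-- ===== VERDICT (by name: the statement is the Claim_ definition above) =====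
theorem passing_counts_py_spec : Claim_equal_passing_counts_py := by
  intro videos _
  unfold Spec_passing_counts_py passing_counts_py passing_counts_py_alt
  rw [pvStep_foldl]
  simp [PySem.List.foldl_ite_add_one]
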